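-- pv_equiv track=rewrite | github.com/qingyundou/gpLoop | add_accent.py | add_accent_p_de
-- ===== SOURCE A (Python) =====
-- def add_accent_p_de(p):
--     info_dict = {'hacked': False}
--     confusions = {'W': 'V', 'CH': 'SH'}
--
--     p = p.split('.')
--     for i, ph in enumerate(p):
--         if ph in confusions:
--             p[i] = confusions[ph]
--             info_dict['hacked'] = True
--             if i>0 and p[i]=='V' and p[i-1]=='HH':
--                 p[i-1] = ''
--     p = [ ph for ph in p if ph!='']
--
--     return '.'.join(p), info_dict
-- ===== SOURCE B (Python) =====
-- def add_accent_p_de(p):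
--     sub = {'W': 'V', 'CH': 'SH'}
--     toks = p.split('.')
--     hacked = any(t in sub for t in toks)
--     kept = [sub.get(t, t) for t, n in zip(toks, toks[1:] + [''])
--             if not (t == 'HH' and n == 'W')]
--     return '.'.join(t for t in kept if t != ''), {'hacked': hacked}
-- ===== Notes on version B (the rewrite author's own statement) =====
-- stated objective: simpler
-- what changed: B is a pure staged computation with no loop state: the flag is computed separately as any(token in confusions), and the kept tokens are a zip-with-lookahead comprehension over (token, next-token) pairs that drops an 'HH' exactly when the next input token is 'W' and maps each token through the substitution, replacing A's in-place index mutation, look-behind blanking and mutable flag.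
import Mathlib
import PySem

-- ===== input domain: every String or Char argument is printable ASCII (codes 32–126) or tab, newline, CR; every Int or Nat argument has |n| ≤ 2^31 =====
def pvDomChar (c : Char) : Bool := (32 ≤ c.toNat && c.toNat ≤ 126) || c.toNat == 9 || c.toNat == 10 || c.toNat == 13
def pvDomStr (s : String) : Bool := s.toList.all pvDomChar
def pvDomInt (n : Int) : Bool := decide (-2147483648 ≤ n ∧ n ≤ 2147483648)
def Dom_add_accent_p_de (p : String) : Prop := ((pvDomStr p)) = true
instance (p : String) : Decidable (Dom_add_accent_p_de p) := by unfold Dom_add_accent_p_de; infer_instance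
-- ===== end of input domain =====

-- B is a pure staged computation (flag via any-membership; kept tokens via a
-- zip-with-lookahead filter+map) instead of A's stateful in-place index mutation;
-- objective: simpler.

-- ===== PORT A =====
-- the loop body of A ('for i, ph in enumerate(p): ...'); in Python the iterator reads the
-- live list, but every read of p[i] happens before any write at an index ≥ i, so iterating
-- over the enumerate of the snapshot is exact
def pvStepA (confusions : PySem.Dict String String) (st : List String × Bool)
    (iph : Int × String) : List String × Bool :=
  match PySem.Dict.get? confusions iph.2 with
  | some v =>
      let l := PySem.List.pySetD st.1 iph.1 v
      if iph.1 > 0 ∧ PySem.List.pyGetD l iph.1 "" = "V"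
          ∧ PySem.List.pyGetD l (iph.1 - 1) "" = "HH"
      then (PySem.List.pySetD l (iph.1 - 1) "", true)
      else (l, true)
  | none => st

def add_accent_p_de (p : String) : String × (List (String × Bool)) :=
  let confusions : PySem.Dict String String := PySem.Dict.ofList [("W", "V"), ("CH", "SH")]
  let toks := (PySem.Str.split? p ".").getD []      -- p.split('.'), sep ≠ ''
  let st := (PySem.List.enumerate toks 0).foldl (pvStepA confusions) (toks, false)
  (PySem.Str.join "." (st.1.filter (fun ph => ph != "")), [("hacked", st.2)])

-- ===== PORT B =====
-- Source B is pure and stateless: 'hacked = any(t in sub for t in toks)';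
-- 'kept = [sub.get(t, t) for t, n in zip(toks, toks[1:] + ['']) if not (t == 'HH' and n == 'W')]'
def add_accent_p_de_alt (p : String) : String × (List (String × Bool)) :=
  let sub : PySem.Dict String String := PySem.Dict.ofList [("W", "V"), ("CH", "SH")]
  let toks := (PySem.Str.split? p ".").getD []
  let hacked := toks.any (fun t => (PySem.Dict.get? sub t).isSome)
  let kept := ((toks.zip (toks.drop 1 ++ [""])).filter
      (fun q => !(q.1 == "HH" && q.2 == "W"))).map
      (fun q => (PySem.Dict.get? sub q.1).getD q.1)
  (PySem.Str.join "." (kept.filter (fun t => t != "")), [("hacked", hacked)])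

-- ===== PRECONDITION & SPEC =====
def Spec_add_accent_p_de (p : String) (out : String × (List (String × Bool))) : Prop := out = add_accent_p_de_alt p
instance (p : String) (out : String × (List (String × Bool))) : Decidable (Spec_add_accent_p_de p out) := by unfold Spec_add_accent_p_de; infer_instance

-- ===== CLAIM (what is proved, stated in full; the proofs are below) =====
def Claim_equal_add_accent_p_de : Prop := ∀ (p : String), Dom_add_accent_p_de p → Spec_add_accent_p_de p (add_accent_p_de p)

-- ===== LEMMAS AND PROOFS =====

-- the substitution a single token undergoes
def pvSub (x : String) : String := if x = "W" then "V" else if x = "CH" then "SH" else x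

def pvIsConf (x : String) : Bool := x == "W" || x == "CH"

-- A's processed list, pointwise with one-token lookahead ('' = the blanked HH)
def pvSpecA : List String → List String
  | [] => []
  | x :: r => (if x = "HH" ∧ r.head? = some "W" then "" else pvSub x) :: pvSpecA r

-- B's kept list, forward: the HH before a W is simply not emitted
def pvSpecC : List String → List String
  | [] => []
  | x :: r => if x = "HH" ∧ r.head? = some "W" then pvSpecC r else pvSub x :: pvSpecC r

theorem pvSpecA_cons (x : String) (r : List String) :
    pvSpecA (x :: r) = (if x = "HH" ∧ r.head? = some "W" then "" else pvSub x) :: pvSpecA r := rfl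

theorem pvSpecC_cons (x : String) (r : List String) :
    pvSpecC (x :: r) = (if x = "HH" ∧ r.head? = some "W" then pvSpecC r else pvSub x :: pvSpecC r) := rfl

theorem pvSub_eq_HH (y : String) : pvSub y = "HH" ↔ y = "HH" := by
  unfold pvSub; split_ifs with h1 h2 <;> simp_all

theorem pvSpecA_length (xs : List String) : (pvSpecA xs).length = xs.length := by
  induction xs with
  | nil => rfl
  | cons x r ih => simp [pvSpecA_cons, ih]

theorem pvSpecA_getD_last (q : String) (pre' : List String) :
    (pvSpecA (q :: pre')).getD ((q :: pre').length - 1) ""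
      = pvSub ((q :: pre').getLast (by simp)) := by
  induction pre' generalizing q with
  | nil => simp [pvSpecA]
  | cons b pre'' ih =>
    rw [pvSpecA_cons]
    have h2 : (q :: b :: pre'').length - 1 = ((b :: pre'').length - 1) + 1 := by simp
    rw [h2, List.getD_cons_succ, ih b]
    congr 1

theorem pvSpecA_snoc (pre : List String) (x : String) :
    pvSpecA (pre ++ [x]) =
      (if x = "W" ∧ pre.getLast? = some "HH"
       then (pvSpecA pre).set (pre.length - 1) ""
       else pvSpecA pre) ++ [pvSub x] := by
  induction pre with
  | nil => simp [pvSpecA, pvSpecA_cons]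
  | cons a pre ih =>
    cases pre with
    | nil =>
      by_cases hx : x = "W" ∧ a = "HH"
      · obtain ⟨h1, h2⟩ := hx
        subst h1; subst h2
        simp [pvSpecA, pvSpecA_cons, pvSub]
      · have h1 : ¬ (a = "HH" ∧ x = "W") := fun h => hx ⟨h.2, h.1⟩
        simp [pvSpecA, pvSpecA_cons, hx, h1]
    | cons b pre' =>
      have hlen : (a :: b :: pre').length - 1 = ((b :: pre').length - 1) + 1 := by simp
      rw [List.cons_append, pvSpecA_cons, ih, List.getLast?_cons_cons,
        pvSpecA_cons (a) (b :: pre'), hlen]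
      simp only [List.head?_cons]
      by_cases hc : x = "W" ∧ (b :: pre').getLast? = some "HH"
      · rw [if_pos hc, if_pos hc]
        simp
      · rw [if_neg hc, if_neg hc]
        simp

-- get?/getD helpers on the boundary of an append
theorem pv_getD_append_len {α : Type} (as : List α) (b : α) (bs : List α) (k : Nat)
    (hk : k = as.length) (d : α) : (as ++ b :: bs).getD k d = b := by
  subst hk
  simp [List.getD]

theorem pv_getD_append_left {α : Type} (as bs : List α) (k : Nat)
    (hk : k < as.length) (d : α) : (as ++ bs).getD k d = as.getD k d := by
  simp [List.getD, List.getElem?_append_left hk]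

-- membership in the confusions dict, evaluated
theorem pv_get?_confusions (x : String) :
    PySem.Dict.get? (PySem.Dict.ofList [("W", "V"), ("CH", "SH")]) x
      = if x = "W" then some "V" else if x = "CH" then some "SH" else none := by
  have hd : (PySem.Dict.ofList [("W", "V"), ("CH", "SH")] : PySem.Dict String String)
      = PySem.Dict.mk [("W", "V"), ("CH", "SH")] := by decide
  rw [hd]
  by_cases h1 : x = "W"
  · subst h1
    decide
  · by_cases h2 : x = "CH"
    · subst h2
      simp [h1]
      decide
    · have h1' : ("W" == x) = false := beq_eq_false_iff_ne.mpr (fun h => h1 h.symm)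
      have h2' : ("CH" == x) = false := beq_eq_false_iff_ne.mpr (fun h => h2 h.symm)
      simp [h1', h2', PySem.Dict.get?, h1, h2]

-- characterization of A's fold
theorem pv_achar (rest : List String) (pre : List String) (h : Bool) :
    (PySem.List.enumerate rest (pre.length : Int)).foldl
        (pvStepA (PySem.Dict.ofList [("W", "V"), ("CH", "SH")]))
        (pvSpecA pre ++ rest, h)
      = (pvSpecA (pre ++ rest), h || rest.any pvIsConf) := by
  induction rest generalizing pre h with
  | nil => simp [PySem.List.enumerate]
  | cons x r ih =>
    rw [PySem.List.enumerate_cons, List.foldl_cons]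
    have hstep : pvStepA (PySem.Dict.ofList [("W", "V"), ("CH", "SH")])
        (pvSpecA pre ++ x :: r, h) ((pre.length : Int), x)
        = (pvSpecA (pre ++ [x]) ++ r, h || pvIsConf x) := by
      unfold pvStepA
      rw [pv_get?_confusions]
      by_cases hW : x = "W"
      · subst hW
        simp only [reduceIte]
        have hset : PySem.List.pySetD (pvSpecA pre ++ "W" :: r) ((pre.length : Int)) "V"
            = pvSpecA pre ++ "V" :: r := by
          rw [PySem.List.pySetD_natCast, List.set_append]
          rw [if_neg (by simp [pvSpecA_length])]
          congr 1
          have h0 : pre.length - (pvSpecA pre).length = 0 := by simp [pvSpecA_length]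
          rw [h0, List.set_cons_zero]
        simp only [hset]
        cases pre with
        | nil =>
          rw [if_neg (by simp)]
          simp [pvSpecA, pvSpecA_cons, pvSub, pvIsConf]
        | cons q pre' =>
          have hpos : ((0 : Int)) < (((q :: pre').length : Nat) : Int) := by
            simp
          have hget : PySem.List.pyGetD (pvSpecA (q :: pre') ++ "V" :: r)
              (((q :: pre').length : Int)) "" = "V" := by
            rw [PySem.List.pyGetD_natCast,
              pv_getD_append_len _ _ _ _ (pvSpecA_length _).symm]
          have hcast : (((q :: pre').length : Int)) - 1
              = (((q :: pre').length - 1 : Nat) : Int) := by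
            simp
          have hlt : (q :: pre').length - 1 < (pvSpecA (q :: pre')).length := by
            rw [pvSpecA_length]; simp
          have hprev : PySem.List.pyGetD (pvSpecA (q :: pre') ++ "V" :: r)
              ((((q :: pre').length : Int)) - 1) ""
              = pvSub ((q :: pre').getLast (by simp)) := by
            rw [hcast, PySem.List.pyGetD_natCast, pv_getD_append_left _ _ _ hlt,
              pvSpecA_getD_last]
          by_cases hHH : (q :: pre').getLast (by simp) = "HH"
          · rw [if_pos ⟨hpos, hget, by rw [hprev, (pvSub_eq_HH _).2 hHH]⟩]
            have hset2 : PySem.List.pySetD (pvSpecA (q :: pre') ++ "V" :: r)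
                ((((q :: pre').length : Int)) - 1) ""
                = ((pvSpecA (q :: pre')).set ((q :: pre').length - 1) "") ++ "V" :: r := by
              rw [hcast, PySem.List.pySetD_natCast, List.set_append, if_pos hlt]
            rw [hset2, pvSpecA_snoc, if_pos ⟨rfl,
              by rw [List.getLast?_eq_some_getLast (List.cons_ne_nil q pre'), hHH]⟩]
            simp [pvSub, pvIsConf]
          · rw [if_neg ?noblank]
            case noblank =>
              rintro ⟨-, -, hc⟩
              rw [hprev, pvSub_eq_HH] at hc
              exact hHH hc
            rw [pvSpecA_snoc, if_neg ?c2]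
            case c2 =>
              rintro ⟨-, hc⟩
              rw [List.getLast?_eq_some_getLast (List.cons_ne_nil q pre')] at hc
              exact hHH (by injection hc)
            simp [pvSub, pvIsConf]
      · by_cases hCH : x = "CH"
        · subst hCH
          rw [if_neg hW]
          simp only [reduceIte]
          have hset : PySem.List.pySetD (pvSpecA pre ++ "CH" :: r) ((pre.length : Int)) "SH"
              = pvSpecA pre ++ "SH" :: r := by
            rw [PySem.List.pySetD_natCast, List.set_append]
            rw [if_neg (by simp [pvSpecA_length])]
            congr 1
            have h0 : pre.length - (pvSpecA pre).length = 0 := by simp [pvSpecA_length]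
            rw [h0, List.set_cons_zero]
          simp only [hset]
          rw [if_neg ?cond]
          case cond =>
            rintro ⟨-, hc, -⟩
            rw [PySem.List.pyGetD_natCast,
              pv_getD_append_len _ _ _ _ (pvSpecA_length _).symm] at hc
            exact absurd hc (by decide)
          rw [pvSpecA_snoc, if_neg (by rintro ⟨hc, -⟩; exact absurd hc (by decide))]
          simp [pvSub, pvIsConf]
        · rw [if_neg hW, if_neg hCH]
          rw [pvSpecA_snoc, if_neg (by rintro ⟨hc, -⟩; exact hW hc)]
          have hx : pvSub x = x := by unfold pvSub; rw [if_neg hW, if_neg hCH]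
          rw [hx]
          simp [pvIsConf, hW, hCH]
    rw [hstep]
    have hlen1 : ((pre.length : Int)) + 1 = (((pre ++ [x]).length : Nat) : Int) := by
      simp
    rw [hlen1, ih (pre ++ [x]) (h || pvIsConf x)]
    simp [Bool.or_assoc]

-- sub.get(t, t) in Source B is exactly pvSub
theorem pv_getD_confusions (x : String) :
    (PySem.Dict.get? (PySem.Dict.ofList [("W", "V"), ("CH", "SH")]) x).getD x = pvSub x := by
  rw [pv_get?_confusions]
  unfold pvSub
  split_ifs <;> rfl

-- 't in sub' in Source B is exactly pvIsConf
theorem pv_isSome_confusions (x : String) :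
    (PySem.Dict.get? (PySem.Dict.ofList [("W", "V"), ("CH", "SH")]) x).isSome = pvIsConf x := by
  rw [pv_get?_confusions]
  unfold pvIsConf
  by_cases h1 : x = "W"
  · simp [h1]
  · by_cases h2 : x = "CH" <;> simp [h1, h2]

-- B's zip-with-lookahead filter+map is exactly pvSpecC
theorem pv_zipspec (toks : List String) :
    ((toks.zip (toks.drop 1 ++ [""])).filter
        (fun q => !(q.1 == "HH" && q.2 == "W"))).map
        (fun q => (PySem.Dict.get? (PySem.Dict.ofList [("W", "V"), ("CH", "SH")]) q.1).getD q.1)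
      = pvSpecC toks := by
  induction toks with
  | nil => rfl
  | cons x r ih =>
    have hzip : (x :: r).zip (List.drop 1 (x :: r) ++ [""])
        = (x, r.head?.getD "") :: r.zip (r.drop 1 ++ [""]) := by
      cases r <;> rfl
    rw [hzip, pvSpecC_cons]
    by_cases hc : x = "HH" ∧ r.head? = some "W"
    · obtain ⟨h1, h2⟩ := hc
      rw [if_pos ⟨h1, h2⟩]
      subst h1
      rw [h2]
      simp only [Option.getD_some]
      rw [List.filter_cons, if_neg (by decide)]
      exact ih
    · rw [if_neg hc, List.filter_cons]
      have hb : (!((x == "HH") && (r.head?.getD "" == "W"))) = true := by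
        by_cases h1 : x = "HH"
        · have h2 : r.head? ≠ some "W" := fun hw => hc ⟨h1, hw⟩
          have h3 : (r.head?.getD "" == "W") = false := by
            cases hr : r.head? with
            | none => rfl
            | some a =>
              simp only [Option.getD_some]
              exact beq_eq_false_iff_ne.mpr (fun ha => h2 (by rw [hr, ha]))
          simp [h3]
        · simp [h1]
      rw [hb, if_pos rfl, List.map_cons, ih, pv_getD_confusions]

-- the two processed lists agree after dropping the empty tokens
theorem pv_filterAC (toks : List String) :
    (pvSpecA toks).filter (fun t => t != "")
      = (pvSpecC toks).filter (fun t => t != "") := by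
  induction toks with
  | nil => rfl
  | cons x r ih =>
    by_cases hc : x = "HH" ∧ r.head? = some "W"
    · rw [pvSpecA_cons, if_pos hc, pvSpecC, if_pos hc]
      simpa using ih
    · rw [pvSpecA_cons, if_neg hc, pvSpecC, if_neg hc]
      simp only [List.filter_cons]
      rw [ih]

-- ===== VERDICT (by name: the statement is the Claim_ definition above) =====
theorem add_accent_p_de_spec : Claim_equal_add_accent_p_de := by
  intro p _
  unfold Spec_add_accent_p_de add_accent_p_de add_accent_p_de_alt
  have hA := pv_achar ((PySem.Str.split? p ".").getD []) [] false
  simp only [List.length_nil, Nat.cast_zero, pvSpecA, List.nil_append, Bool.false_or] at hA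
  simp only [hA, pv_zipspec, pv_filterAC, pv_isSome_confusions]
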